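-- pv_equiv track=rewrite | github.com/olivierjuanedf/ElectricSystemPlanning | utils/basic_utils.py | are_lists_eq
-- ===== SOURCE A (Python) =====
-- from typing import List, Optional, Tuple, Union
--
-- def are_lists_eq(list_of_lists: List[list]) -> bool:
--     first_list = list_of_lists[0]
--     len_first_list = len(first_list)
--     set_first_list = set(first_list)
--     n_lists = len(list_of_lists)
--     for i_list in range(1, n_lists):
--         current_list = list_of_lists[i_list]
--         if not (len(current_list) == len_first_list and set(current_list) == set_first_list):
--             return False
--     return True
-- ===== SOURCE B (Python) =====
-- def are_lists_eq(list_of_lists):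
--     sigs = {(len(l), frozenset(l)) for l in list_of_lists}
--     return len(sigs) <= 1
-- ===== Notes on version B (the rewrite author's own statement) =====
-- stated objective: simpler
-- what changed: Replaces the compare-each-list-against-the-first loop with early exit by one comprehension that reduces every list to a (length, frozenset) signature and checks there is at most one distinct signature.
-- crash fix: On the empty input list A raises IndexError (it reads list_of_lists[0]); B returns True (all zero lists are trivially equal). — e.g. on are_lists_eq([]): A raises IndexError, B returns true
import Mathlib
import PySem

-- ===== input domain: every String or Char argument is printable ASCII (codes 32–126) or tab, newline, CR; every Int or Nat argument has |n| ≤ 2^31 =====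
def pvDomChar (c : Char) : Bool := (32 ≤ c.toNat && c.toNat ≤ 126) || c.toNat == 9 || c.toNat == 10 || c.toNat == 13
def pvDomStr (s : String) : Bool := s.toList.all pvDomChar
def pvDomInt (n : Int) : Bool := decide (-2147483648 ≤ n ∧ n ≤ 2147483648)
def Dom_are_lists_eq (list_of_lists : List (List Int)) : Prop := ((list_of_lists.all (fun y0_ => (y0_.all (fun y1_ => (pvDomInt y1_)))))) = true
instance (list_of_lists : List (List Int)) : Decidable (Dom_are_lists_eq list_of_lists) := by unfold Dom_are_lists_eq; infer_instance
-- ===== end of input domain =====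

-- B replaces A's compare-against-first loop (with early exit) by building the set of
-- (length, frozenset) signatures of all lists and checking it has at most one element.
-- On the empty input A raises IndexError while B returns True (see Raises_ below).

-- ===== PORT A =====
-- the 'for i_list in range(1, n_lists)' loop with its early 'return False'
def areListsEqLoop (len_first : Nat) (set_first : PySem.Set Int) :
    List (List Int) → Bool
  | [] => true
  | current_list :: rest =>
    if !(current_list.length == len_first &&
         PySem.Set.equal (PySem.Set.ofList current_list) set_first) then
      false
    else
      areListsEqLoop len_first set_first rest

def are_lists_eq (list_of_lists : List (List Int)) : Bool :=
  match list_of_lists with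
  | [] => false  -- Python raises IndexError here; excluded by Pre_are_lists_eq
  | first_list :: rest =>
    let len_first_list := first_list.length
    let set_first_list := PySem.Set.ofList first_list
    areListsEqLoop len_first_list set_first_list rest

-- ===== PORT B =====
-- canonical value of (len(l), frozenset(l)): frozenset rendered as the sorted list of
-- the distinct elements, so structural equality of signatures is Python's tuple equality
def pySig (l : List Int) : Nat × List Int :=
  (l.length, PySem.List.sorted (PySem.Set.ofList l) (fun x => x) false)

def are_lists_eq_alt (list_of_lists : List (List Int)) : Bool :=
  decide ((PySem.Set.ofList (list_of_lists.map pySig)).length ≤ 1)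

-- ===== PRECONDITION & SPEC =====
-- Pre_ excludes only the empty list, on which A raises IndexError (list_of_lists[0]).
def Pre_are_lists_eq (list_of_lists : List (List Int)) : Prop := list_of_lists ≠ []
instance (list_of_lists : List (List Int)) : Decidable (Pre_are_lists_eq list_of_lists) := by
  unfold Pre_are_lists_eq; infer_instance

def pvWitness_are_lists_eq : List (List Int) := [[1, 2], [2, 1]]

-- On the empty input list A raises IndexError; B returns True.
def Raises_are_lists_eq (list_of_lists : List (List Int)) : Prop := list_of_lists = []
instance (list_of_lists : List (List Int)) : Decidable (Raises_are_lists_eq list_of_lists) := by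
  unfold Raises_are_lists_eq; infer_instance

def pvRaiseWitness_are_lists_eq : List (List Int) := []
def pvRaiseWitnessOut_are_lists_eq : Bool := true

def Spec_are_lists_eq (list_of_lists : List (List Int)) (out : Bool) : Prop :=
  out = are_lists_eq_alt list_of_lists
instance (list_of_lists : List (List Int)) (out : Bool) : Decidable (Spec_are_lists_eq list_of_lists out) := by
  unfold Spec_are_lists_eq; infer_instance

-- ===== CLAIM (what is proved, stated in full; the proofs are below) =====
def Claim_equal_are_lists_eq : Prop :=
  ∀ (list_of_lists : List (List Int)), Dom_are_lists_eq list_of_lists →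
    Pre_are_lists_eq list_of_lists →
    Spec_are_lists_eq list_of_lists (are_lists_eq list_of_lists)

def Claim_raises_are_lists_eq : Prop :=
  (∀ (list_of_lists : List (List Int)), Dom_are_lists_eq list_of_lists →
      Raises_are_lists_eq list_of_lists → ¬ Pre_are_lists_eq list_of_lists) ∧
  (Dom_are_lists_eq (pvRaiseWitness_are_lists_eq) ∧
   Raises_are_lists_eq (pvRaiseWitness_are_lists_eq) ∧
   are_lists_eq_alt (pvRaiseWitness_are_lists_eq) = pvRaiseWitnessOut_are_lists_eq)

-- ===== LEMMAS AND PROOFS =====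

-- equal signatures = equal lengths and equal element sets
theorem pySig_eq_iff (l f : List Int) :
    pySig l = pySig f ↔
      (l.length = f.length ∧
        PySem.Set.equal (PySem.Set.ofList l) (PySem.Set.ofList f) = true) := by
  unfold pySig
  rw [Prod.ext_iff]
  simp only [PySem.List.sorted_id_eq_sorted_id_iff_perm, PySem.Set.equal_iff]
  constructor
  · rintro ⟨h1, h2⟩
    exact ⟨h1, fun x => h2.mem_iff⟩
  · rintro ⟨h1, h2⟩
    refine ⟨h1, (List.perm_ext_iff_of_nodup ?_ ?_).mpr h2⟩
    · exact PySem.Set.nodup_ofList l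
    · exact PySem.Set.nodup_ofList f

-- A's loop is "every remaining list has first's signature"
theorem areListsEqLoop_eq (f : List Int) (rest : List (List Int)) :
    areListsEqLoop f.length (PySem.Set.ofList f) rest =
      decide (∀ l ∈ rest, pySig l = pySig f) := by
  induction rest with
  | nil => simp [areListsEqLoop]
  | cons c rs ih =>
    rw [areListsEqLoop, ih]
    by_cases hc : pySig c = pySig f
    · have ⟨h1, h2⟩ := (pySig_eq_iff c f).mp hc
      simp [h1, h2, hc]
    · have : ¬ (c.length = f.length ∧
          PySem.Set.equal (PySem.Set.ofList c) (PySem.Set.ofList f) = true) :=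
        fun h => hc ((pySig_eq_iff c f).mpr h)
      rcases Decidable.not_and_iff_not_or_not.mp this with h | h
      · simp [h, hc]
      · simp at h
        simp [h, hc]

-- "at most one distinct value among a :: ys" = "every y in ys equals a"
theorem ofList_cons_length_le_one_iff {α : Type} [BEq α] [LawfulBEq α] (a : α) (ys : List α) :
    (PySem.Set.ofList (a :: ys)).length ≤ 1 ↔ ∀ y ∈ ys, y = a := by
  rw [PySem.Set.ofList_cons, List.length_cons]
  constructor
  · intro h y hy
    have hnil : PySem.Set.discard (PySem.Set.ofList ys) a = [] :=
      List.length_eq_zero_iff.mp (by omega)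
    by_contra hne
    have hmem : y ∈ PySem.Set.discard (PySem.Set.ofList ys) a := by
      rw [PySem.Set.mem_discard]
      exact ⟨(PySem.Set.mem_ofList ys y).mpr hy, hne⟩
    rw [hnil] at hmem
    exact absurd hmem (List.not_mem_nil)
  · intro h
    have hnil : PySem.Set.discard (PySem.Set.ofList ys) a = [] := by
      rw [List.eq_nil_iff_forall_not_mem]
      intro y hy
      rw [PySem.Set.mem_discard, PySem.Set.mem_ofList] at hy
      exact hy.2 (h y hy.1)
    rw [hnil]
    simp

-- ===== VERDICT (by name: the statement is the Claim_ definition above) =====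
theorem are_lists_eq_spec : Claim_equal_are_lists_eq := by
  intro ls _ hpre
  match ls with
  | [] => exact absurd rfl hpre
  | f :: rest =>
    show areListsEqLoop f.length (PySem.Set.ofList f) rest = are_lists_eq_alt (f :: rest)
    rw [areListsEqLoop_eq]
    unfold are_lists_eq_alt
    rw [List.map_cons]
    simp only [decide_eq_decide]
    rw [ofList_cons_length_le_one_iff]
    constructor
    · intro h y hy
      rcases List.mem_map.mp hy with ⟨l, hl, rfl⟩
      exact h l hl
    · intro h l hl
      exact h (pySig l) (List.mem_map_of_mem hl)

theorem are_lists_eq_raises : Claim_raises_are_lists_eq := by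
  unfold Claim_raises_are_lists_eq
  exact ⟨fun ls _ hr hp => hp hr, by decide⟩

-- self-check: B's port really returns the stated literal at the raise witness
theorem are_lists_eq_raise_witness_ok :
    are_lists_eq_alt pvRaiseWitness_are_lists_eq = pvRaiseWitnessOut_are_lists_eq :=
  are_lists_eq_raises.2.2.2
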